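-- pv_equiv track=rewrite | github.com/daniel-reich/ubiquitous-fiesta | tfbKAYwHq2ot2FK3i_23.py | non_repeats
-- ===== SOURCE A (Python) =====
-- def non_repeats(radix):
--   n=radix
--   S=0
--   for i in range(1,n):
--     p=1
--     for j in range(1,i+1):
--       p=p*(n-j)
--     S=S+p
--   return (n-1)*(S+1)
-- ===== SOURCE B (Python) =====
-- def non_repeats(radix):
--     n = radix
--     p = 1
--     S = 0
--     for j in range(1, n):
--         p *= (n - j)
--         S += p
--     return (n - 1) * (S + 1)
-- ===== Notes on version B (the rewrite author's own statement) =====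
-- stated objective: faster
-- what changed: replaces the nested loop (recomputing each falling-factorial product from scratch) with a single pass that maintains the running product incrementally
import Mathlib
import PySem

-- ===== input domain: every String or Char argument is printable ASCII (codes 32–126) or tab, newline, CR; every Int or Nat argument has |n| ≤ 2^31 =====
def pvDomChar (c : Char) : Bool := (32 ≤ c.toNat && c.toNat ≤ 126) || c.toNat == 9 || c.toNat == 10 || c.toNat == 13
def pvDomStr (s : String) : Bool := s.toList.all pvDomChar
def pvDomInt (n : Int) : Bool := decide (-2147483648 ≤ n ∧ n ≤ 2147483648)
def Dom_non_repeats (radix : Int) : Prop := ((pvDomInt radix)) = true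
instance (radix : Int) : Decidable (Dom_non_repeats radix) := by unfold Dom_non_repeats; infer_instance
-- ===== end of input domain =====

-- B maintains the running falling-factorial product in one pass instead of A's nested loops (asymptotically faster).

-- ===== PORT A =====
def non_repeats (radix : Int) : Int :=
  let n := radix
  let S := (PySem.List.pyRange 1 n 1).foldl
    (fun S i =>
      let p := (PySem.List.pyRange 1 (i + 1) 1).foldl (fun p j => p * (n - j)) 1
      S + p) 0
  (n - 1) * (S + 1)

-- ===== PORT B =====
def non_repeats_alt (radix : Int) : Int :=
  let n := radix
  let ps := (PySem.List.pyRange 1 n 1).foldl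
    (fun ps j => (ps.1 * (n - j), ps.2 + ps.1 * (n - j))) ((1 : Int), (0 : Int))
  (n - 1) * (ps.2 + 1)

-- ===== PRECONDITION & SPEC =====
def Spec_non_repeats (radix : Int) (out : Int) : Prop := out = non_repeats_alt radix
instance (radix : Int) (out : Int) : Decidable (Spec_non_repeats radix out) := by unfold Spec_non_repeats; infer_instance

-- ===== CLAIM (what is proved, stated in full; the proofs are below) =====
def Claim_equal_non_repeats : Prop := ∀ (radix : Int), Dom_non_repeats radix → Spec_non_repeats radix (non_repeats radix)

-- ===== LEMMAS AND PROOFS =====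

-- Invariant: B's single fold carries (running product, A's partial sum).
theorem pv_invariant (n : Int) (k : Nat) :
    (PySem.List.pyRange 1 (1 + k) 1).foldl
      (fun ps j => (ps.1 * (n - j), ps.2 + ps.1 * (n - j))) ((1 : Int), (0 : Int))
    = ((PySem.List.pyRange 1 (1 + k) 1).foldl (fun p j => p * (n - j)) 1,
       (PySem.List.pyRange 1 (1 + k) 1).foldl
         (fun S i => S + (PySem.List.pyRange 1 (i + 1) 1).foldl (fun p j => p * (n - j)) 1) 0) := by
  induction k with
  | zero => simp [PySem.List.pyRange_one_eq_nil (by omega : (1:Int) ≤ 1)]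
  | succ k ih =>
      have h : ((1 : Int) + (k + 1 : Nat)) = (1 + (k : Int)) + 1 := by push_cast; ring
      rw [h, PySem.List.pyRange_one_succ_right (by omega : (1:Int) ≤ 1 + (k : Int))]
      simp only [List.foldl_append, ih, List.foldl_cons, List.foldl_nil]
      rw [PySem.List.pyRange_one_succ_right (by omega : (1:Int) ≤ 1 + (k : Int))]
      simp only [List.foldl_append, List.foldl_cons, List.foldl_nil]

-- ===== VERDICT (by name: the statement is the Claim_ definition above) =====
theorem non_repeats_spec : Claim_equal_non_repeats := by
  intro radix _
  unfold Spec_non_repeats non_repeats non_repeats_alt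
  by_cases h : radix ≤ 1
  · simp [PySem.List.pyRange_one_eq_nil h]
  · have hk : ∃ k : Nat, radix = 1 + (k : Int) := ⟨(radix - 1).toNat, by omega⟩
    obtain ⟨k, hkeq⟩ := hk
    simp only [hkeq, pv_invariant]
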